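-- pv_equiv track=rewrite | github.com/whoisarjun/graphite | graphite-math/graphite/tree_utils.py | prefix_to_latex
-- ===== SOURCE A (Python) =====
-- from typing import List, Tuple, Optional
--
-- def prefix_to_latex(tokens: List[str]) -> str:
--     """Convert prefix notation back to LaTeX - handles malformed input."""
--
--     def safe_parse_tokens(pos: int) -> Tuple[str, int]:
--         """Parse tokens - never crashes."""
--         if pos >= len(tokens):
--             return "", pos
--
--         token = tokens[pos]
--
--         try:
--             if token == 'FRAC':
--                 pos += 1
--                 num_latex, pos = safe_parse_tokens(pos)
--                 den_latex, pos = safe_parse_tokens(pos)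
--                 return f"\\frac{{{num_latex}}}{{{den_latex}}}", pos
--
--             elif token == 'POW':
--                 pos += 1
--                 base_latex, pos = safe_parse_tokens(pos)
--                 exp_latex, pos = safe_parse_tokens(pos)
--
--                 if ' ' in exp_latex or any(op in exp_latex for op in ['+', '-', '*', '/']):
--                     return f"{base_latex}^{{{exp_latex}}}", pos
--                 else:
--                     return f"{base_latex}^{exp_latex}", pos
--
--             elif token == 'SUBSCRIPT':
--                 pos += 1
--                 base_latex, pos = safe_parse_tokens(pos)
--                 sub_latex, pos = safe_parse_tokens(pos)
--
--                 if ' ' in sub_latex or any(op in sub_latex for op in ['+', '-', '*', '/']):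
--                     return f"{base_latex}_{{{sub_latex}}}", pos
--                 else:
--                     return f"{base_latex}_{sub_latex}", pos
--
--             elif token == 'ADD':
--                 pos += 1
--                 left_latex, pos = safe_parse_tokens(pos)
--                 right_latex, pos = safe_parse_tokens(pos)
--                 return f"{left_latex} + {right_latex}", pos
--
--             elif token == 'MINUS':
--                 pos += 1
--                 left_latex, pos = safe_parse_tokens(pos)
--                 right_latex, pos = safe_parse_tokens(pos)
--                 return f"{left_latex} - {right_latex}", pos
--
--             elif token == 'MUL':
--                 pos += 1
--                 left_latex, pos = safe_parse_tokens(pos)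
--                 right_latex, pos = safe_parse_tokens(pos)
--                 return f"{left_latex} {right_latex}", pos
--
--             else:
--                 # Terminal token or unknown - just return it
--                 return token, pos + 1
--
--         except:
--             # If anything fails, just return the token as-is
--             return token, pos + 1
--
--     if not tokens:
--         return ""
--
--     try:
--         result, _ = safe_parse_tokens(0)
--         return result
--     except:
--         # Ultimate fallback - join all tokens
--         return " ".join(tokens)
-- ===== SOURCE B (Python) =====
-- def prefix_to_latex(tokens):
--     """Convert prefix notation back to LaTeX - iterative stack machine."""
--     OPS = ('FRAC', 'POW', 'SUBSCRIPT', 'ADD', 'MINUS', 'MUL')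
--
--     def needs_braces(s):
--         return ' ' in s or any(op in s for op in '+-*/')
--
--     def combine(op, a, b):
--         if op == 'FRAC':
--             return f"\\frac{{{a}}}{{{b}}}"
--         if op == 'POW':
--             return f"{a}^{{{b}}}" if needs_braces(b) else f"{a}^{b}"
--         if op == 'SUBSCRIPT':
--             return f"{a}_{{{b}}}" if needs_braces(b) else f"{a}_{b}"
--         if op == 'ADD':
--             return f"{a} + {b}"
--         if op == 'MINUS':
--             return f"{a} - {b}"
--         return f"{a} {b}"
--
--     if not tokens:
--         return ""
--     stack = []  # frames: [operator, first operand or None]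
--     i, n = 0, len(tokens)
--     while True:
--         if i < n:
--             tok = tokens[i]
--             i += 1
--             if tok in OPS:
--                 stack.append([tok, None])
--                 continue
--             val = tok
--         else:
--             val = ""  # ran off the end: missing operand is empty
--         while stack and stack[-1][1] is not None:
--             op, a = stack.pop()
--             val = combine(op, a, val)
--         if not stack:
--             return val
--         stack[-1][1] = val
-- ===== Notes on version B (the rewrite author's own statement) =====
-- stated objective: alternative
-- what changed: Replaced the recursive-descent parser (nested safe_parse_tokens calls threading pos) by an iterative left-to-right stack machine whose frames hold an operator and its first completed operand, folding completed subexpressions upward.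
import Mathlib
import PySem

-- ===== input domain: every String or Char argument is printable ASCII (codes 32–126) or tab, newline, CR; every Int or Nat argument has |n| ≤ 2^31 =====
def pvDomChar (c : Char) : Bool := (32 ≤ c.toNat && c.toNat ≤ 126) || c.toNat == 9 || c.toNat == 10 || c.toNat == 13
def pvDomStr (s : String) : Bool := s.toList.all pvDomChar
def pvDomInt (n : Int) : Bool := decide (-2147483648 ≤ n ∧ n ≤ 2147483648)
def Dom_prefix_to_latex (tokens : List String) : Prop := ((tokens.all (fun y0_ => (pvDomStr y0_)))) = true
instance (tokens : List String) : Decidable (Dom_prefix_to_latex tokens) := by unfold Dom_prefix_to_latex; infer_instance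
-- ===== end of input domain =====

-- B replaces A's recursive-descent parser by an iterative stack machine over the tokens (objective: alternative, same cost).
-- A's try/except blocks are unreachable for these list/str operations, so the ports omit them.

-- ===== PORT A =====
-- A's `pos` index is represented by the remaining suffix `tokens[pos:]`; the returned suffix
-- carries a proof `r.2.length ≤ l.length` needed only for termination of the port itself.
def pvParseA : (l : List String) → { r : String × List String // r.2.length ≤ l.length }
  | [] => ⟨("", []), Nat.le_refl _⟩
  | t :: rest =>
    if t = "FRAC" then
      let p1 := pvParseA rest
      let p2 := pvParseA p1.val.2
      ⟨("\\frac{" ++ p1.val.1 ++ "}{" ++ p2.val.1 ++ "}", p2.val.2),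
        Nat.le_succ_of_le (Nat.le_trans p2.property p1.property)⟩
    else if t = "POW" then
      let p1 := pvParseA rest
      let p2 := pvParseA p1.val.2
      ⟨(if PySem.Str.isIn " " p2.val.1 || (["+", "-", "*", "/"].any fun op => PySem.Str.isIn op p2.val.1)
          then p1.val.1 ++ "^{" ++ p2.val.1 ++ "}" else p1.val.1 ++ "^" ++ p2.val.1, p2.val.2),
        Nat.le_succ_of_le (Nat.le_trans p2.property p1.property)⟩
    else if t = "SUBSCRIPT" then
      let p1 := pvParseA rest
      let p2 := pvParseA p1.val.2
      ⟨(if PySem.Str.isIn " " p2.val.1 || (["+", "-", "*", "/"].any fun op => PySem.Str.isIn op p2.val.1)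
          then p1.val.1 ++ "_{" ++ p2.val.1 ++ "}" else p1.val.1 ++ "_" ++ p2.val.1, p2.val.2),
        Nat.le_succ_of_le (Nat.le_trans p2.property p1.property)⟩
    else if t = "ADD" then
      let p1 := pvParseA rest
      let p2 := pvParseA p1.val.2
      ⟨(p1.val.1 ++ " + " ++ p2.val.1, p2.val.2),
        Nat.le_succ_of_le (Nat.le_trans p2.property p1.property)⟩
    else if t = "MINUS" then
      let p1 := pvParseA rest
      let p2 := pvParseA p1.val.2
      ⟨(p1.val.1 ++ " - " ++ p2.val.1, p2.val.2),
        Nat.le_succ_of_le (Nat.le_trans p2.property p1.property)⟩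
    else if t = "MUL" then
      let p1 := pvParseA rest
      let p2 := pvParseA p1.val.2
      ⟨(p1.val.1 ++ " " ++ p2.val.1, p2.val.2),
        Nat.le_succ_of_le (Nat.le_trans p2.property p1.property)⟩
    else
      ⟨(t, rest), Nat.le_succ _⟩
termination_by l => l.length
decreasing_by
  all_goals first
    | exact Nat.lt_succ_of_le (Nat.le_refl _)
    | exact Nat.lt_succ_of_le p1.property

def prefix_to_latex (tokens : List String) : String :=
  if tokens = [] then "" else (pvParseA tokens).val.1

-- ===== PORT B =====
def pvNeedsBraces (s : String) : Bool :=
  PySem.Str.isIn " " s || (["+", "-", "*", "/"].any fun op => PySem.Str.isIn op s)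

def pvCombine (op a b : String) : String :=
  if op = "FRAC" then "\\frac{" ++ a ++ "}{" ++ b ++ "}"
  else if op = "POW" then
    if pvNeedsBraces b then a ++ "^{" ++ b ++ "}" else a ++ "^" ++ b
  else if op = "SUBSCRIPT" then
    if pvNeedsBraces b then a ++ "_{" ++ b ++ "}" else a ++ "_" ++ b
  else if op = "ADD" then a ++ " + " ++ b
  else if op = "MINUS" then a ++ " - " ++ b
  else a ++ " " ++ b

def pvIsOp (t : String) : Bool :=
  t = "FRAC" || t = "POW" || t = "SUBSCRIPT" || t = "ADD" || t = "MINUS" || t = "MUL"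

-- Source B's inner while-loop: hand `v` up the stack, combining completed frames;
-- `.inl ans` = the expression is complete (stack emptied), `.inr` = a frame took `v` as first operand.
def pvFeed : List (String × Option String) → String → String ⊕ List (String × Option String)
  | [], v => Sum.inl v
  | (op, none) :: s, v => Sum.inr ((op, some v) :: s)
  | (op, some a) :: s, v => pvFeed s (pvCombine op a v)

-- termination measure for the outer loop when the token list is exhausted
def pvWeight (stack : List (String × Option String)) : Nat :=
  (stack.map (fun f => match f.2 with | none => 2 | some _ => 1)).sum

theorem pvFeed_inr_weight : ∀ (stack : List (String × Option String)) (v : String)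
    (s' : List (String × Option String)), pvFeed stack v = Sum.inr s' → pvWeight s' < pvWeight stack := by
  intro stack
  induction stack with
  | nil => intro v s' h; simp [pvFeed] at h
  | cons f s ih =>
    intro v s' h
    obtain ⟨op, a⟩ := f
    cases a with
    | none =>
      simp [pvFeed] at h
      subst h
      simp [pvWeight]
    | some a =>
      have := ih (pvCombine op a v) s' (by simpa [pvFeed] using h)
      simp [pvWeight] at this ⊢
      omega

-- Source B's outer while-loop: read the next token (or "" after the end) and feed it up.
def pvRunB (toks : List String) (stack : List (String × Option String)) : String :=
  match toks with
  | t :: rest =>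
    if pvIsOp t then pvRunB rest ((t, none) :: stack)
    else
      match _h1 : pvFeed stack t with
      | Sum.inl ans => ans
      | Sum.inr stack' => pvRunB rest stack'
  | [] =>
    match _h2 : pvFeed stack "" with
    | Sum.inl ans => ans
    | Sum.inr stack' => pvRunB [] stack'
termination_by (toks.length, pvWeight stack)
decreasing_by
  · exact Prod.Lex.left _ _ (Nat.lt_succ_of_le (Nat.le_refl _))
  · exact Prod.Lex.left _ _ (Nat.lt_succ_of_le (Nat.le_refl _))
  · exact Prod.Lex.right _ (pvFeed_inr_weight _ _ _ (by assumption))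

def prefix_to_latex_alt (tokens : List String) : String :=
  if tokens = [] then "" else pvRunB tokens []

-- ===== PRECONDITION & SPEC =====
def Spec_prefix_to_latex (tokens : List String) (out : String) : Prop := out = prefix_to_latex_alt tokens
instance (tokens : List String) (out : String) : Decidable (Spec_prefix_to_latex tokens out) := by unfold Spec_prefix_to_latex; infer_instance

-- ===== CLAIM (what is proved, stated in full; the proofs are below) =====
def Claim_equal_prefix_to_latex : Prop := ∀ (tokens : List String), Dom_prefix_to_latex tokens → Spec_prefix_to_latex tokens (prefix_to_latex tokens)

-- ===== LEMMAS AND PROOFS =====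

-- A-side meaning of a B stack: hand `v` up the frames, parsing missing second operands from `l`.
def pvEval : List (String × Option String) → String → List String → String
  | [], v, _ => v
  | (op, some a) :: s, v, l => pvEval s (pvCombine op a v) l
  | (op, none) :: s, v, l =>
    pvEval s (pvCombine op v (pvParseA l).val.1) (pvParseA l).val.2

theorem pvFeed_inl (stack : List (String × Option String)) (v ans : String)
    (h : pvFeed stack v = Sum.inl ans) (l : List String) : pvEval stack v l = ans := by
  induction stack generalizing v with
  | nil => simpa [pvFeed, pvEval] using h
  | cons f s ih =>
    obtain ⟨op, a⟩ := f
    cases a with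
    | none => simp [pvFeed] at h
    | some a => exact ih (pvCombine op a v) (by simpa [pvFeed] using h)

theorem pvFeed_inr (stack : List (String × Option String)) (v : String)
    (s' : List (String × Option String)) (h : pvFeed stack v = Sum.inr s') (l : List String) :
    pvEval stack v l = pvEval s' (pvParseA l).val.1 (pvParseA l).val.2 := by
  induction stack generalizing v with
  | nil => simp [pvFeed] at h
  | cons f s ih =>
    obtain ⟨op, a⟩ := f
    cases a with
    | none =>
      simp [pvFeed] at h
      subst h
      simp [pvEval]
    | some a =>
      exact ih (pvCombine op a v) (by simpa [pvFeed] using h)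

theorem pvParseA_cons_op (t : String) (rest : List String) (hop : pvIsOp t = true) :
    (pvParseA (t :: rest)).val =
      (pvCombine t (pvParseA rest).val.1 (pvParseA (pvParseA rest).val.2).val.1,
       (pvParseA (pvParseA rest).val.2).val.2) := by
  simp only [pvIsOp, Bool.or_eq_true, decide_eq_true_eq] at hop
  rcases hop with ((((h | h) | h) | h) | h) | h <;> subst h <;>
    simp [pvParseA, pvCombine, pvNeedsBraces]

theorem pvParseA_terminal (t : String) (rest : List String) (hop : pvIsOp t = false) :
    (pvParseA (t :: rest)).val = (t, rest) := by
  simp only [pvIsOp, Bool.or_eq_false_iff, decide_eq_false_iff_not] at hop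
  obtain ⟨⟨⟨⟨⟨h1, h2⟩, h3⟩, h4⟩, h5⟩, h6⟩ := hop
  simp [pvParseA, h1, h2, h3, h4, h5, h6]

theorem pvParseA_nil : (pvParseA ([] : List String)).val = ("", []) := by
  simp [pvParseA]

theorem pvRunB_eq_eval : ∀ (toks : List String) (stack : List (String × Option String)),
    pvRunB toks stack = pvEval stack (pvParseA toks).val.1 (pvParseA toks).val.2 := by
  intro toks stack
  induction toks, stack using pvRunB.induct with
  | case1 stack t rest hop ih =>
    rw [pvRunB]
    simp only [hop, if_true]
    rw [ih, pvParseA_cons_op t rest hop]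
    simp [pvEval]
  | case2 stack t rest hop ans hfeed =>
    rw [pvRunB]
    simp only [hop, Bool.false_eq_true, if_false]
    rw [pvParseA_terminal t rest (by simpa using hop)]
    split
    · next heq => rw [pvFeed_inl stack t ans hfeed rest]; cases hfeed ▸ heq; rfl
    · next heq => rw [hfeed] at heq; cases heq
  | case3 stack t rest hop stack' hfeed ih =>
    rw [pvRunB]
    simp only [hop, Bool.false_eq_true, if_false]
    rw [pvParseA_terminal t rest (by simpa using hop)]
    split
    · next heq => rw [hfeed] at heq; cases heq
    · next s2 heq =>
      rw [hfeed] at heq; cases heq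
      rw [ih, pvFeed_inr stack t stack' hfeed rest]
  | case4 stack ans hfeed =>
    rw [pvRunB]
    split
    · next heq =>
      rw [hfeed] at heq; cases heq
      simp only [pvParseA_nil]
      exact (pvFeed_inl stack "" ans hfeed []).symm
    · next heq => rw [hfeed] at heq; cases heq
  | case5 stack stack' hfeed ih =>
    rw [pvRunB]
    split
    · next heq => rw [hfeed] at heq; cases heq
    · next s2 heq =>
      rw [hfeed] at heq; cases heq
      rw [ih]
      have h2 := pvFeed_inr stack "" stack' hfeed []
      simp only [pvParseA_nil] at h2 ⊢
      exact h2.symm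

-- ===== VERDICT (by name: the statement is the Claim_ definition above) =====
theorem prefix_to_latex_spec : Claim_equal_prefix_to_latex := by
  unfold Claim_equal_prefix_to_latex Spec_prefix_to_latex
  intro tokens _
  unfold prefix_to_latex prefix_to_latex_alt
  split
  · rfl
  · rw [pvRunB_eq_eval]
    simp [pvEval]
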